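-- pv_equiv track=rewrite | github.com/AjayPrasath01/AiNeat-Implementation | SnakeGame.py | look_to
-- ===== SOURCE A (Python) =====
-- width = 16  # size of field width in blocks
--
-- height = 16
--
-- def look_to(orient, pos, game_matrix):
--     dx, dy = orient
--     px, py = pos
--
--     body_found = False
--     food_found = False
--
--     dist_food = width
--     dist_tail = width
--     dist_wall = width
--
--     dist = 0
--
--     while px >= 0 and px < width and py >= 0 and py < height:
--         if not body_found and game_matrix[px][py] == 1:
--             dist_tail = dist
--             body_found = True
--         if not food_found and game_matrix[px][py] == 2:
--             dist_food = dist
--             food_found = True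
--
--         dist_wall = dist
--         px += dx
--         py += dy
--         dist += 1
--
--     return (dist_wall, dist_food, dist_tail)
-- ===== SOURCE B (Python) =====
-- width = 16  # size of field width in blocks
--
-- height = 16
--
--
-- def _first_index(path, target):
--     for i, v in enumerate(path):
--         if v == target:
--             return i
--     return width
--
--
-- def look_to(orient, pos, game_matrix):
--     dx, dy = orient
--     px, py = pos
--
--     # one walk of the ray, collecting the cell values seen
--     path = []
--     while 0 <= px < width and 0 <= py < height:
--         path.append(game_matrix[px][py])
--         px += dx
--         py += dy
--
--     dist_wall = len(path) - 1 if path else width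
--     dist_food = _first_index(path, 2)
--     dist_tail = _first_index(path, 1)
--     return (dist_wall, dist_food, dist_tail)
-- ===== Notes on version B (the rewrite author's own statement) =====
-- stated objective: simpler
-- what changed: Instead of one fused loop threading five accumulators and two found-flags, B walks the ray once collecting the visited cell values into a list and then derives the three distances by independent scans (length for the wall, first index of 2 for food, first index of 1 for the body).
-- outside the precondition, e.g. on look_to((-1, -1), (0, 0), [[0]]): A returns (0, 16, 16), B returns (0, 16, 16)
import Mathlib
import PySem

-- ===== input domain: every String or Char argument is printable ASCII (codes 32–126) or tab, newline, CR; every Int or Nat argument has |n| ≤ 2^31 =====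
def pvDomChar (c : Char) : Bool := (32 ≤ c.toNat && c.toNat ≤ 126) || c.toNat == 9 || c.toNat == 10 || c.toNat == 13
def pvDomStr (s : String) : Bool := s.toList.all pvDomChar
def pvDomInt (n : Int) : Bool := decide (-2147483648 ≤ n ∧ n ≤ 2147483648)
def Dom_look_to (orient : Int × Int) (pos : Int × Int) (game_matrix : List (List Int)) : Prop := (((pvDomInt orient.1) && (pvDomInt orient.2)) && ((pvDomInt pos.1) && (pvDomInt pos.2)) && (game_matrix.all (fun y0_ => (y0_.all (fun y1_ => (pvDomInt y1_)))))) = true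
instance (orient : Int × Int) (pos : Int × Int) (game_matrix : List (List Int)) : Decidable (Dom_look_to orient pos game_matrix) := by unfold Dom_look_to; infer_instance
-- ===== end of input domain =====

-- B replaces A's fused five-accumulator loop by one walk collecting the visited
-- cells into a list plus three independent scans of that list ('simpler').

-- ===== PORT A =====
-- while loop ported as fuel recursion; inside Pre_ the grid is at most 16x16 and
-- the step is nonzero, so the loop runs at most 16 times and fuel 64 is never
-- exhausted.  px,py are ≥ 0 under the guard, so .toNat is exact; the getD
-- defaults are unreachable inside Pre_ (Python would raise IndexError there).
def lookToLoop (dx dy : Int) (gm : List (List Int)) : Nat → Int → Int → Int → Bool → Bool → Int → Int → Int → Int × Int × Int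
  | 0, _, _, _, _, _, dFood, dTail, dWall => (dWall, dFood, dTail)
  | fuel+1, px, py, dist, bodyFound, foodFound, dFood, dTail, dWall =>
    if 0 ≤ px ∧ px < 16 ∧ 0 ≤ py ∧ py < 16 then
      let v := (gm.getD px.toNat []).getD py.toNat 0
      let bodyFound' := if ¬bodyFound ∧ v = 1 then true else bodyFound
      let dTail' := if ¬bodyFound ∧ v = 1 then dist else dTail
      let foodFound' := if ¬foodFound ∧ v = 2 then true else foodFound
      let dFood' := if ¬foodFound ∧ v = 2 then dist else dFood
      lookToLoop dx dy gm fuel (px+dx) (py+dy) (dist+1) bodyFound' foodFound' dFood' dTail' dist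
    else (dWall, dFood, dTail)

def look_to (orient : Int × Int) (pos : Int × Int) (game_matrix : List (List Int)) : Int × Int × Int :=
  lookToLoop orient.1 orient.2 game_matrix 64 pos.1 pos.2 0 false false 16 16 16

-- ===== PORT B =====
-- the single walk of the ray, collecting cell values (same fuel guard as A's loop)
def walkPath (dx dy : Int) (gm : List (List Int)) : Nat → Int → Int → List Int
  | 0, _, _ => []
  | fuel+1, px, py =>
    if 0 ≤ px ∧ px < 16 ∧ 0 ≤ py ∧ py < 16 then
      ((gm.getD px.toNat []).getD py.toNat 0) :: walkPath dx dy gm fuel (px+dx) (py+dy)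
    else []

-- port of _first_index: first index of target in path, else width = 16
def firstIndexFrom (target : Int) : List Int → Int → Int
  | [], _ => 16
  | v :: rest, i => if v = target then i else firstIndexFrom target rest (i+1)

def look_to_alt (orient : Int × Int) (pos : Int × Int) (game_matrix : List (List Int)) : Int × Int × Int :=
  let path := walkPath orient.1 orient.2 game_matrix 64 pos.1 pos.2
  ((if path = [] then (16:Int) else (path.length : Int) - 1),
   firstIndexFrom 2 path 0,
   firstIndexFrom 1 path 0)

-- ===== PRECONDITION & SPEC =====
-- Pre_ excludes inputs where Python A diverges (zero step starting inside the
-- 16x16 grid) or raises IndexError (a matrix smaller than 16x16 while the start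
-- is inside the grid; this also excludes some inputs on which the ray happens to
-- leave the grid before reaching a missing row/cell, where A still returns).
def Pre_look_to (orient : Int × Int) (pos : Int × Int) (game_matrix : List (List Int)) : Prop :=
  (¬ (0 ≤ pos.1 ∧ pos.1 < 16 ∧ 0 ≤ pos.2 ∧ pos.2 < 16)) ∨
  (¬ (orient.1 = 0 ∧ orient.2 = 0) ∧ 16 ≤ game_matrix.length ∧ ∀ row ∈ game_matrix, 16 ≤ row.length)
instance (orient : Int × Int) (pos : Int × Int) (game_matrix : List (List Int)) : Decidable (Pre_look_to orient pos game_matrix) := by unfold Pre_look_to; infer_instance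

def pvWitness_look_to : (Int × Int) × (Int × Int) × List (List Int) := ((1, 0), (20, 3), [])

def Spec_look_to (orient : Int × Int) (pos : Int × Int) (game_matrix : List (List Int)) (out : Int × Int × Int) : Prop := out = look_to_alt orient pos game_matrix
instance (orient : Int × Int) (pos : Int × Int) (game_matrix : List (List Int)) (out : Int × Int × Int) : Decidable (Spec_look_to orient pos game_matrix out) := by unfold Spec_look_to; infer_instance

-- ===== CLAIM (what is proved, stated in full; the proofs are below) =====
def Claim_equal_look_to : Prop := ∀ (orient : Int × Int) (pos : Int × Int) (game_matrix : List (List Int)), Dom_look_to orient pos game_matrix → Pre_look_to orient pos game_matrix → Spec_look_to orient pos game_matrix (look_to orient pos game_matrix)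

-- ===== LEMMAS AND PROOFS =====

-- generalized-default version of firstIndexFrom, for the loop invariant
def findFrom (target : Int) : List Int → Int → Int → Int
  | [], _, d => d
  | v :: rest, i, d => if v = target then i else findFrom target rest (i+1) d

theorem firstIndexFrom_eq_findFrom (target : Int) (path : List Int) (i : Int) :
    firstIndexFrom target path i = findFrom target path i 16 := by
  induction path generalizing i with
  | nil => rfl
  | cons v rest ih => simp [firstIndexFrom, findFrom, ih]

-- the loop invariant: A's fused loop equals the three scans of B's path
theorem lookToLoop_eq (dx dy : Int) (gm : List (List Int)) (fuel : Nat) :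
    ∀ (px py dist : Int) (bf ff : Bool) (dF dT dW : Int),
    lookToLoop dx dy gm fuel px py dist bf ff dF dT dW =
      ((if walkPath dx dy gm fuel px py = [] then dW
        else dist + ((walkPath dx dy gm fuel px py).length : Int) - 1),
       (if ff then dF else findFrom 2 (walkPath dx dy gm fuel px py) dist dF),
       (if bf then dT else findFrom 1 (walkPath dx dy gm fuel px py) dist dT)) := by
  induction fuel with
  | zero => intro px py dist bf ff dF dT dW; simp [lookToLoop, walkPath, findFrom]
  | succ n ih =>
    intro px py dist bf ff dF dT dW
    by_cases h : 0 ≤ px ∧ px < 16 ∧ 0 ≤ py ∧ py < 16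
    · simp only [lookToLoop, walkPath, if_pos h]
      rw [ih]
      set v := (gm.getD px.toNat []).getD py.toNat 0 with hv
      set rest := walkPath dx dy gm n (px+dx) (py+dy) with hrest
      refine Prod.ext ?_ (Prod.ext ?_ ?_)
      · rcases rest with _ | ⟨r, rs⟩
        · simp
        · simp
          ring
      · simp only [findFrom]
        cases ff <;> by_cases hv2 : v = 2 <;> simp [hv2]
      · simp only [findFrom]
        cases bf <;> by_cases hv1 : v = 1 <;> simp [hv1]
    · simp [lookToLoop, walkPath, if_neg h, findFrom]

-- ===== VERDICT (by name: the statement is the Claim_ definition above) =====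
theorem look_to_spec : Claim_equal_look_to := by
  intro orient pos gm _ _
  unfold Spec_look_to look_to look_to_alt
  rw [lookToLoop_eq]
  simp only [firstIndexFrom_eq_findFrom]
  generalize walkPath orient.1 orient.2 gm 64 pos.1 pos.2 = W
  rcases W with _ | ⟨v, rest⟩ <;> simp
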